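-- pv_equiv track=rewrite | github.com/tamcung/writing | experiments/formal/targeted_sql_mutation.py | _quote_mask
-- ===== SOURCE A (Python) =====
-- def _quote_mask(text: str) -> list[bool]:
--     mask = [False] * len(text)
--     quote: str | None = None
--     escaped = False
--     quote_start: int | None = None
--     for i, ch in enumerate(text):
--         if quote is not None:
--             mask[i] = True
--             if escaped:
--                 escaped = False
--             elif ch == "\\":
--                 escaped = True
--             elif ch == quote:
--                 quote = None
--                 quote_start = None
--             continue
--         if ch in {"'", '"'}:
--             quote = ch
--             quote_start = i
--             mask[i] = True
--     if quote is not None and quote_start is not None: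
--         for i in range(quote_start, len(text)):
--             mask[i] = False
--     return mask
-- ===== SOURCE B (Python) =====
-- def _find_close(text: str, start: int, quote: str):
--     """Index of the first unescaped `quote` at or after `start`, else None."""
--     escaped = False
--     for j in range(start, len(text)):
--         if escaped:
--             escaped = False
--         elif text[j] == "\\":
--             escaped = True
--         elif text[j] == quote:
--             return j
--     return None
--
--
-- def _quote_mask(text: str) -> list[bool]:
--     n = len(text)
--     mask = [False] * n
--     i = 0
--     while i < n:
--         ch = text[i]
--         if ch in ("'", '"'):
--             j = _find_close(text, i + 1, ch)
--             if j is None: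
--                 break  # unterminated quote: nothing more gets marked
--             for k in range(i, j + 1):
--                 mask[k] = True
--             i = j + 1
--         else:
--             i += 1
--     return mask
-- ===== Notes on version B (the rewrite author's own statement) =====
-- stated objective: alternative
-- what changed: A runs a flat one-pass state machine (quote/escaped flags) that marks eagerly and erases an unterminated tail in a cleanup loop; B uses a nested scan: an outer index loop that, on a quote, calls a helper to find the matching unescaped close and only then marks the whole span, so no cleanup is ever needed.
import Mathlib
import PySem

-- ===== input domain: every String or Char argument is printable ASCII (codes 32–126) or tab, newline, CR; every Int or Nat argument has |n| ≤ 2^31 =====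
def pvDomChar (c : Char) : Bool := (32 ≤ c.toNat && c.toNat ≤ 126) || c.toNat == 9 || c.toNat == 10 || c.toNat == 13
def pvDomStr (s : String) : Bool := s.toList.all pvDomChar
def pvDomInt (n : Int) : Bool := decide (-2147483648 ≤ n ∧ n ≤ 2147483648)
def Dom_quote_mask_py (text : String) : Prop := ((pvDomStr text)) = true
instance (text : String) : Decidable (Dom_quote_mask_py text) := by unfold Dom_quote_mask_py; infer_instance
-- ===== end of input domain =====

-- B replaces A's flat one-pass state machine (mark eagerly, erase an unterminated tail in a
-- cleanup loop) by a nested scan: find the matching unescaped close first, then mark the span.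

-- ===== PORT A =====
-- one iteration of A's for loop; state = (mask, quote, escaped, quote_start);
-- the enumerate index i is nonnegative, so mask[i] = True is mask.set i.toNat true
def pyA_step (st : List Bool × Option Char × Bool × Option Int) (ic : Int × Char) :
    List Bool × Option Char × Bool × Option Int :=
  match st, ic with
  | (mask, quote, escaped, qs), (i, ch) =>
    match quote with
    | some q =>
      let mask1 := mask.set i.toNat true
      if escaped then (mask1, some q, false, qs)
      else if ch = '\\' then (mask1, some q, true, qs)
      else if ch = q then (mask1, none, escaped, none)
      else (mask1, some q, escaped, qs)
    | none =>
      if ch = '\'' ∨ ch = '"' then (mask.set i.toNat true, some ch, escaped, some i)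
      else (mask, none, escaped, qs)

-- A's trailing cleanup: 'if quote is not None and quote_start is not None: for i in range(qs, len(text)): mask[i] = False'
def pyA_finalize (n : Nat) (st : List Bool × Option Char × Bool × Option Int) : List Bool :=
  match st with
  | (mask, some _, _, some qs) =>
      (PySem.List.pyRange qs n 1).foldl (fun m i => m.set i.toNat false) mask
  | (mask, _, _, _) => mask

def quote_mask_py (text : String) : List Bool :=
  let cs := text.toList
  pyA_finalize cs.length
    ((PySem.List.enumerate cs 0).foldl pyA_step (List.replicate cs.length false, none, false, none))

-- ===== PORT B =====
-- helper _find_close: 'for j in range(start, len(text))' with the escape flag;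
-- the fuel is the number of remaining loop iterations (it only makes the loop total)
def findCloseGo (cs : List Char) (q : Char) : Nat → Nat → Bool → Option Nat
  | 0, _, _ => none
  | fuel+1, j, escaped =>
    if h : j < cs.length then
      if escaped then findCloseGo cs q fuel (j+1) false
      else if cs[j] = '\\' then findCloseGo cs q fuel (j+1) true
      else if cs[j] = q then some j
      else findCloseGo cs q fuel (j+1) false
    else none

def findCloseB (cs : List Char) (q : Char) (j : Nat) (escaped : Bool) : Option Nat :=
  findCloseGo cs q (cs.length - j) j escaped

-- the while loop of B; fuel = remaining iterations (i strictly increases each turn)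
def loopGo (cs : List Char) : Nat → Nat → List Bool → List Bool
  | 0, _, mask => mask
  | fuel+1, i, mask =>
    if h : i < cs.length then
      if cs[i] = '\'' ∨ cs[i] = '"' then
        match findCloseB cs (cs[i]) (i+1) false with
        | none => mask
        | some j =>
            -- 'for k in range(i, j + 1): mask[k] = True'
            loopGo cs fuel (j+1) ((List.range' i (j+1-i)).foldl (fun m k => m.set k true) mask)
      else loopGo cs fuel (i+1) mask
    else mask

def quote_mask_py_alt (text : String) : List Bool :=
  let cs := text.toList
  loopGo cs cs.length 0 (List.replicate cs.length false)

-- ===== PRECONDITION & SPEC =====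
def Spec_quote_mask_py (text : String) (out : List Bool) : Prop := out = quote_mask_py_alt text
instance (text : String) (out : List Bool) : Decidable (Spec_quote_mask_py text out) := by unfold Spec_quote_mask_py; infer_instance

-- ===== CLAIM (what is proved, stated in full; the proofs are below) =====
def Claim_equal_quote_mask_py : Prop := ∀ (text : String), Dom_quote_mask_py text → Spec_quote_mask_py text (quote_mask_py text)

-- ===== LEMMAS AND PROOFS =====

-- proof-side abbreviation for B's marking loop
def markUpTo (m : List Bool) (a b : Nat) : List Bool :=
  (List.range' a (b - a)).foldl (fun m k => m.set k true) m

theorem length_markUpTo (a b : Nat) (m : List Bool) : (markUpTo m a b).length = m.length := by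
  unfold markUpTo
  induction hk : b - a generalizing a m with
  | zero => simp
  | succ k IH =>
    rw [List.range'_succ, List.foldl_cons, IH (a+1) (m.set a true) (by omega)]
    simp

theorem getElem?_markUpTo (a b : Nat) (m : List Bool) (k : Nat) :
    (markUpTo m a b)[k]? = if a ≤ k ∧ k < b ∧ k < m.length then some true else m[k]? := by
  unfold markUpTo
  induction hd : b - a generalizing a m with
  | zero =>
    simp only [List.range'_zero, List.foldl_nil]
    split
    · omega
    · rfl
  | succ d IH =>
    rw [List.range'_succ, List.foldl_cons, IH (a+1) (m.set a true) (by omega)]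
    simp only [List.length_set, List.getElem?_set]
    by_cases h1 : a + 1 ≤ k ∧ k < b ∧ k < m.length
    · rw [if_pos h1, if_pos ⟨by omega, h1.2⟩]
    · rw [if_neg h1]
      by_cases h2 : a = k
      · subst h2
        rw [if_pos rfl]
        by_cases h3 : a < m.length
        · rw [if_pos h3, if_pos ⟨le_refl _, by omega, h3⟩]
        · rw [if_neg h3, if_neg (by omega), List.getElem?_eq_none (by omega)]
      · rw [if_neg h2, if_neg (by omega)]

theorem markUpTo_set (m : List Bool) (a b : Nat) (h : a < b) :
    markUpTo (m.set a true) (a+1) b = markUpTo m a b := by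
  unfold markUpTo
  have hb : b - a = (b - (a+1)) + 1 := by omega
  rw [hb, List.range'_succ, List.foldl_cons]

theorem markUpTo_self (m : List Bool) (a b : Nat) (h : b ≤ a) : markUpTo m a b = m := by
  unfold markUpTo
  have : b - a = 0 := by omega
  rw [this]; simp

-- one-step unfoldings of _find_close's loop
theorem findCloseB_stop (cs : List Char) (q : Char) (j : Nat) (esc : Bool) (hj : ¬ j < cs.length) :
    findCloseB cs q j esc = none := by
  unfold findCloseB
  cases hf : cs.length - j with
  | zero => rfl
  | succ f => omega

theorem findCloseB_step (cs : List Char) (q : Char) (j : Nat) (esc : Bool) (hj : j < cs.length) :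
    findCloseB cs q j esc =
      if esc then findCloseB cs q (j+1) false
      else if cs[j] = '\\' then findCloseB cs q (j+1) true
      else if cs[j] = q then some j
      else findCloseB cs q (j+1) false := by
  unfold findCloseB
  have hf : cs.length - j = (cs.length - (j+1)) + 1 := by omega
  rw [hf]
  simp only [findCloseGo, hj, dite_true]

theorem findCloseB_bounds (cs : List Char) (q : Char) :
    ∀ (j : Nat) (e : Bool) (r : Nat), findCloseB cs q j e = some r → j ≤ r ∧ r < cs.length := by
  intro j
  induction hd : cs.length - j using Nat.strong_induction_on generalizing j with
  | _ d IH =>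
    intro e r h
    by_cases hj : j < cs.length
    · rw [findCloseB_step cs q j e hj] at h
      have step : ∀ e', findCloseB cs q (j+1) e' = some r → j ≤ r ∧ r < cs.length := by
        intro e' h'
        have := IH (cs.length - (j+1)) (by omega) (j+1) rfl e' r h'
        omega
      split at h
      · exact step _ h
      · split at h
        · exact step _ h
        · split at h
          · cases h; exact ⟨le_refl _, hj⟩
          · exact step _ h
    · rw [findCloseB_stop cs q j e hj] at h
      cases h

-- the fuel only makes the while loop total: any sufficient fuel gives the same result
theorem loopGo_ge (cs : List Char) (f i : Nat) (mask : List Bool) (hi : ¬ i < cs.length) :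
    loopGo cs f i mask = mask := by
  cases f with
  | zero => rfl
  | succ f => simp only [loopGo, hi, dite_false]

theorem loopGo_fuel (cs : List Char) :
    ∀ (f1 f2 i : Nat) (mask : List Bool), cs.length - i ≤ f1 → cs.length - i ≤ f2 →
      loopGo cs f1 i mask = loopGo cs f2 i mask := by
  intro f1
  induction f1 with
  | zero =>
    intro f2 i mask h1 _
    have hi : ¬ i < cs.length := by omega
    rw [loopGo_ge cs 0 i mask hi, loopGo_ge cs f2 i mask hi]
  | succ f1 IH =>
    intro f2 i mask h1 h2
    by_cases hi : i < cs.length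
    · cases f2 with
      | zero => omega
      | succ f2 =>
        simp only [loopGo, hi, dite_true]
        by_cases hq : cs[i] = '\'' ∨ cs[i] = '"'
        · rw [if_pos hq, if_pos hq]
          cases hfc : findCloseB cs (cs[i]) (i+1) false with
          | none => rfl
          | some j =>
            have hb := findCloseB_bounds cs (cs[i]) (i+1) false j hfc
            exact IH f2 (j+1) _ (by omega) (by omega)
        · rw [if_neg hq, if_neg hq]
          exact IH f2 (i+1) mask (by omega) (by omega)
    · rw [loopGo_ge cs _ i mask hi, loopGo_ge cs _ i mask hi]

-- canonical-fuel view of the while loop, with one-step unfoldings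
def loopB (cs : List Char) (i : Nat) (mask : List Bool) : List Bool :=
  loopGo cs (cs.length - i) i mask

theorem loopB_stop (cs : List Char) (i : Nat) (mask : List Bool) (hi : ¬ i < cs.length) :
    loopB cs i mask = mask := loopGo_ge cs _ i mask hi

theorem loopB_step_none (cs : List Char) (i : Nat) (mask : List Bool) (hi : i < cs.length)
    (hq : cs[i] = '\'' ∨ cs[i] = '"') (hfc : findCloseB cs (cs[i]) (i+1) false = none) :
    loopB cs i mask = mask := by
  unfold loopB
  have hf : cs.length - i = (cs.length - (i+1)) + 1 := by omega
  rw [hf]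
  simp only [loopGo, hi, dite_true, if_pos hq, hfc]

theorem loopB_step_some (cs : List Char) (i j : Nat) (mask : List Bool) (hi : i < cs.length)
    (hq : cs[i] = '\'' ∨ cs[i] = '"') (hfc : findCloseB cs (cs[i]) (i+1) false = some j) :
    loopB cs i mask = loopB cs (j+1) (markUpTo mask i (j+1)) := by
  unfold loopB
  have hb := findCloseB_bounds cs (cs[i]) (i+1) false j hfc
  have hf : cs.length - i = (cs.length - (i+1)) + 1 := by omega
  rw [hf]
  simp only [loopGo, hi, dite_true, if_pos hq, hfc]
  exact loopGo_fuel cs _ _ (j+1) _ (by omega) (by omega)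

theorem loopB_step_else (cs : List Char) (i : Nat) (mask : List Bool) (hi : i < cs.length)
    (hq : ¬ (cs[i] = '\'' ∨ cs[i] = '"')) :
    loopB cs i mask = loopB cs (i+1) mask := by
  unfold loopB
  have hf : cs.length - i = (cs.length - (i+1)) + 1 := by omega
  rw [hf]
  simp only [loopGo, hi, dite_true, if_neg hq]

-- A's cleanup loop, pointwise
theorem getElem?_resetFrom (s n : Nat) (m : List Bool) (k : Nat) :
    ((PySem.List.pyRange (s : Int) (n : Int) 1).foldl (fun m i => m.set i.toNat false) m)[k]? =
      if s ≤ k ∧ k < n ∧ k < m.length then some false else m[k]? := by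
  induction hd : n - s generalizing s m with
  | zero =>
    rw [PySem.List.pyRange_one_eq_nil (by omega)]
    simp only [List.foldl_nil]
    split
    · omega
    · rfl
  | succ d IH =>
    rw [PySem.List.pyRange_one_cons (by exact_mod_cast (by omega : (s:Int) < (n:Int)))]
    rw [List.foldl_cons]
    have hcast : ((s : Int) + 1) = ((s + 1 : Nat) : Int) := by push_cast; ring
    rw [hcast, IH (s+1) _ (by omega)]
    simp only [List.length_set, List.getElem?_set, Int.toNat_natCast]
    by_cases h1 : s + 1 ≤ k ∧ k < n ∧ k < m.length
    · rw [if_pos h1, if_pos ⟨by omega, h1.2⟩]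
    · rw [if_neg h1]
      by_cases h2 : s = k
      · subst h2
        rw [if_pos rfl]
        by_cases h3 : s < m.length
        · rw [if_pos h3, if_pos ⟨le_refl _, by omega, h3⟩]
        · rw [if_neg h3, if_neg (by omega), List.getElem?_eq_none (by omega)]
      · rw [if_neg h2, if_neg (by omega)]

-- proof-side abbreviation for A's fold over the enumerated suffix
def foldA (cs : List Char) (i : Nat) (st : List Bool × Option Char × Bool × Option Int) :
    List Bool × Option Char × Bool × Option Int :=
  (PySem.List.enumerate cs (i : Int)).foldl pyA_step st

theorem foldA_cons (cs : List Char) (i : Nat) (hi : i < cs.length) (st) :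
    foldA (cs.drop i) i st = foldA (cs.drop (i+1)) (i+1) (pyA_step st ((i : Int), cs[i])) := by
  unfold foldA
  rw [List.drop_eq_getElem_cons hi, PySem.List.enumerate_cons, List.foldl_cons]
  have hcast : ((i : Int) + 1) = ((i + 1 : Nat) : Int) := by push_cast; ring
  rw [hcast]

-- A's for loop from an open-quote state, when the closing quote exists
theorem loopA_open_some (cs : List Char) (q : Char) :
    ∀ (i : Nat) (esc : Bool) (mask : List Bool) (s : Int) (j : Nat),
      findCloseB cs q i esc = some j →
      foldA (cs.drop i) i (mask, some q, esc, some s)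
        = foldA (cs.drop (j+1)) (j+1) (markUpTo mask i (j+1), none, false, none) := by
  intro i
  induction hd : cs.length - i using Nat.strong_induction_on generalizing i with
  | _ d IH =>
    intro esc mask s j hfc
    by_cases hi : i < cs.length
    · rw [findCloseB_step cs q i esc hi] at hfc
      have hstep : ∀ (esc' : Bool), findCloseB cs q (i+1) esc' = some j →
          foldA (cs.drop (i+1)) (i+1) (mask.set i true, some q, esc', some s)
            = foldA (cs.drop (j+1)) (j+1) (markUpTo mask i (j+1), none, false, none) := by
        intro esc' h'
        have hb := findCloseB_bounds cs q (i+1) esc' j h'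
        rw [IH (cs.length - (i+1)) (by omega) (i+1) rfl esc' (mask.set i true) s j h']
        rw [markUpTo_set mask i (j+1) (by omega)]
      rw [foldA_cons cs i hi]
      split at hfc
      · rename_i hesc
        simp only [pyA_step, hesc, if_true, Int.toNat_natCast]
        exact hstep false hfc
      · rename_i hesc
        have he0 : esc = false := by simpa using hesc
        subst he0
        split at hfc
        · rename_i hbs
          simp only [pyA_step, Bool.false_eq_true, if_false, hbs, if_true, Int.toNat_natCast]
          exact hstep true hfc
        · rename_i hbs
          split at hfc
          · rename_i hq
            injection hfc with hji
            subst hji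
            have hbs' : ¬ (q = '\\') := by rw [← hq]; exact hbs
            have hm : markUpTo mask i (i+1) = mask.set i true := by
              unfold markUpTo
              have h1 : i + 1 - i = 1 := by omega
              rw [h1]; simp
            simp only [pyA_step, Bool.false_eq_true, if_false, hq, hbs', if_true, Int.toNat_natCast]
            rw [hm]
          · rename_i hq
            simp only [pyA_step, Bool.false_eq_true, if_false, hbs, hq, Int.toNat_natCast]
            exact hstep false hfc
    · rw [findCloseB_stop cs q i esc hi] at hfc
      cases hfc

-- A's for loop from an open-quote state, when the quote is unterminated
theorem loopA_open_none (cs : List Char) (q : Char) :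
    ∀ (i : Nat) (esc : Bool) (mask : List Bool) (s : Int),
      findCloseB cs q i esc = none →
      ∃ esc', foldA (cs.drop i) i (mask, some q, esc, some s)
        = (markUpTo mask i cs.length, some q, esc', some s) := by
  intro i
  induction hd : cs.length - i using Nat.strong_induction_on generalizing i with
  | _ d IH =>
    intro esc mask s hfc
    by_cases hi : i < cs.length
    · rw [findCloseB_step cs q i esc hi] at hfc
      have hstep : ∀ (esc' : Bool), findCloseB cs q (i+1) esc' = none →
          ∃ e'', foldA (cs.drop (i+1)) (i+1) (mask.set i true, some q, esc', some s)
            = (markUpTo mask i cs.length, some q, e'', some s) := by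
        intro esc' h'
        obtain ⟨e'', he⟩ := IH (cs.length - (i+1)) (by omega) (i+1) rfl esc' (mask.set i true) s h'
        exact ⟨e'', by rw [he, markUpTo_set mask i cs.length hi]⟩
      rw [foldA_cons cs i hi]
      split at hfc
      · rename_i hesc
        simp only [pyA_step, hesc, if_true, Int.toNat_natCast]
        exact hstep false hfc
      · rename_i hesc
        have he0 : esc = false := by simpa using hesc
        subst he0
        split at hfc
        · rename_i hbs
          simp only [pyA_step, Bool.false_eq_true, if_false, hbs, if_true, Int.toNat_natCast]
          exact hstep true hfc
        · rename_i hbs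
          split at hfc
          · cases hfc
          · rename_i hq
            simp only [pyA_step, Bool.false_eq_true, if_false, hbs, hq, Int.toNat_natCast]
            exact hstep false hfc
    · refine ⟨esc, ?_⟩
      have hdrop : cs.drop i = [] := List.drop_eq_nil_of_le (by omega)
      rw [markUpTo_self mask i cs.length (by omega), hdrop]
      unfold foldA
      simp [PySem.List.enumerate_nil]

-- main coupling: A's loop + cleanup from a no-quote state equals B's while loop
theorem loopA_main (cs : List Char) :
    ∀ (i : Nat) (mask : List Bool), mask.length = cs.length →
      (∀ k, i ≤ k → k < cs.length → mask[k]? = some false) →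
      pyA_finalize cs.length (foldA (cs.drop i) i (mask, none, false, none)) = loopB cs i mask := by
  intro i
  induction hd : cs.length - i using Nat.strong_induction_on generalizing i with
  | _ d IH =>
    intro mask hlen hmask
    by_cases hi : i < cs.length
    · rw [foldA_cons cs i hi]
      by_cases hq : cs[i] = '\'' ∨ cs[i] = '"'
      · simp only [pyA_step, hq, if_true, Int.toNat_natCast]
        cases hfc : findCloseB cs (cs[i]) (i+1) false with
        | none =>
          rw [loopB_step_none cs i mask hi hq hfc]
          obtain ⟨esc', he⟩ := loopA_open_none cs (cs[i]) (i+1) false (mask.set i true) (i : Int) hfc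
          rw [he]
          simp only [pyA_finalize]
          apply List.ext_getElem?
          intro k
          rw [getElem?_resetFrom i cs.length _ k, getElem?_markUpTo]
          simp only [List.length_set, List.getElem?_set, length_markUpTo]
          by_cases h1 : i ≤ k ∧ k < cs.length
          · rw [if_pos ⟨h1.1, h1.2, by omega⟩, (hmask k h1.1 h1.2).symm]
          · rw [if_neg (by omega)]
            split
            · omega
            · split
              · omega
              · rfl
        | some j =>
          have hb := findCloseB_bounds cs (cs[i]) (i+1) false j hfc
          rw [loopB_step_some cs i j mask hi hq hfc]
          rw [loopA_open_some cs (cs[i]) (i+1) false (mask.set i true) (i : Int) j hfc]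
          rw [markUpTo_set mask i (j+1) (by omega)]
          exact IH (cs.length - (j+1)) (by omega) (j+1) rfl (markUpTo mask i (j+1))
            (by rw [length_markUpTo]; exact hlen)
            (by
              intro k hk1 hk2
              rw [getElem?_markUpTo]
              rw [if_neg (by omega)]
              exact hmask k (by omega) hk2)
      · simp only [pyA_step, hq, if_false]
        rw [loopB_step_else cs i mask hi hq]
        exact IH (cs.length - (i+1)) (by omega) (i+1) rfl mask hlen
          (fun k hk1 hk2 => hmask k (by omega) hk2)
    · rw [loopB_stop cs i mask hi]
      have hdrop : cs.drop i = [] := List.drop_eq_nil_of_le (by omega)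
      rw [hdrop]
      unfold foldA
      simp [PySem.List.enumerate_nil, pyA_finalize]

-- ===== VERDICT (by name: the statement is the Claim_ definition above) =====
theorem quote_mask_py_spec : Claim_equal_quote_mask_py := by
  intro text _
  unfold Spec_quote_mask_py quote_mask_py quote_mask_py_alt
  have h := loopA_main text.toList 0 (List.replicate text.toList.length false) (by simp)
    (by
      intro k _ hk
      rw [List.getElem?_replicate, if_pos (by simpa using hk)])
  unfold foldA loopB at h
  simpa using h
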